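-- pv_equiv track=rewrite | github.com/jacopos97/APFandMotionPlanning | APFandMotionPlanning.py | node_color
-- ===== SOURCE A (Python) =====
-- def node_color(g_nodes, path):
--     c = []
--     for node in g_nodes:
--         if node in path:
--             if node == 'start' or node == 'goal':
--                 c.append('red')
--             else:
--                 c.append('blue')
--         else:
--             c.append('lightblue')
--     return c
-- ===== SOURCE B (Python) =====
-- def node_color(g_nodes, path):
--     positions = {}
--     for i, node in enumerate(g_nodes):
--         positions.setdefault(node, []).append(i)
--     c = ['lightblue'] * len(g_nodes)
--     for node in path:
--         color = 'red' if node == 'start' or node == 'goal' else 'blue'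
--         for i in positions.get(node, []):
--             c[i] = color
--     return c
-- ===== Notes on version B (the rewrite author's own statement) =====
-- stated objective: faster
-- what changed: B inverts the iteration: it indexes positions of each node in g_nodes once, prefills the whole answer with 'lightblue', and then iterates over path painting each path node's positions with its color, instead of A's per-node membership scan of path.
import Mathlib
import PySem

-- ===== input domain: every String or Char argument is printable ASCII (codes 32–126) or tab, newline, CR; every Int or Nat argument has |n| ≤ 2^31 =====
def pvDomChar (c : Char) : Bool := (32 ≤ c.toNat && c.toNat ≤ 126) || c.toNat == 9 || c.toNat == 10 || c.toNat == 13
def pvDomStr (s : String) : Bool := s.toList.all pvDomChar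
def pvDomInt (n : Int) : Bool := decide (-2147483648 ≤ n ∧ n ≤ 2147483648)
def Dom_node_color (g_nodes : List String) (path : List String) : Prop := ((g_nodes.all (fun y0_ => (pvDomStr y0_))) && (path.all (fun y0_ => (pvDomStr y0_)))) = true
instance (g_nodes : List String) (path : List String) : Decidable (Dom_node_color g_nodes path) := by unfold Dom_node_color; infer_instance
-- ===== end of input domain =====

-- B inverts the iteration: it indexes positions per node once, prefills 'lightblue', then paints by path (faster decomposition, same results).

-- ===== PORT A =====
def node_color (g_nodes : List String) (path : List String) : List String :=
  g_nodes.foldl (fun c node =>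
    if node ∈ path then
      if node = "start" ∨ node = "goal" then c ++ ["red"] else c ++ ["blue"]
    else c ++ ["lightblue"]) []

-- ===== PORT B =====
def node_color_alt (g_nodes : List String) (path : List String) : List String :=
  -- positions = {}; for i, node in enumerate(g_nodes): positions.setdefault(node, []).append(i)
  let positions : PySem.Dict String (List Int) :=
    (PySem.List.enumerate g_nodes).foldl
      (fun d p => d.insert p.2 (d.getD p.2 [] ++ [p.1])) PySem.Dict.empty
  -- c = ['lightblue'] * len(g_nodes)
  let c0 : List String := g_nodes.map (fun _ => "lightblue")
  -- for node in path: paint positions.get(node, []) with node's color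
  path.foldl (fun c node =>
    let color := if node = "start" ∨ node = "goal" then "red" else "blue"
    -- c[i] = color: every stored index is a valid nonnegative index, so List.set at i.toNat is exact
    (positions.getD node []).foldl (fun c i => c.set i.toNat color) c) c0

-- ===== PRECONDITION & SPEC =====
def Spec_node_color (g_nodes : List String) (path : List String) (out : List String) : Prop := out = node_color_alt g_nodes path
instance (g_nodes : List String) (path : List String) (out : List String) : Decidable (Spec_node_color g_nodes path out) := by unfold Spec_node_color; infer_instance

-- ===== CLAIM (what is proved, stated in full; the proofs are below) =====
def Claim_equal_node_color : Prop := ∀ (g_nodes : List String) (path : List String), Dom_node_color g_nodes path → Spec_node_color g_nodes path (node_color g_nodes path)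

-- ===== LEMMAS AND PROOFS =====

def pvColorOf (n : String) : String := if n = "start" ∨ n = "goal" then "red" else "blue"

-- A's foldl with a general accumulator equals accumulator ++ map
theorem node_color_foldl_map (g_nodes path : List String) (acc : List String) :
    g_nodes.foldl (fun cs node =>
      if node ∈ path then
        if node = "start" ∨ node = "goal" then cs ++ ["red"] else cs ++ ["blue"]
      else cs ++ ["lightblue"]) acc
    = acc ++ g_nodes.map (fun node =>
        if node ∈ path then pvColorOf node else "lightblue") := by
  induction g_nodes generalizing acc with
  | nil => simp
  | cons n rest ih =>
    simp only [List.foldl_cons, List.map_cons]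
    by_cases h1 : n ∈ path
    · by_cases h2 : n = "start" ∨ n = "goal" <;> simp [h1, h2, ih, pvColorOf]
    · simp [h1, ih]

-- the positions dict answers with the accumulated indices of k
theorem getD_posfold (l : List (Int × String)) (d : PySem.Dict String (List Int)) (k : String) :
    (l.foldl (fun d p => d.insert p.2 (d.getD p.2 [] ++ [p.1])) d).getD k []
      = d.getD k [] ++ (l.filter (fun p => p.2 == k)).map (fun p => p.1) := by
  induction l generalizing d with
  | nil => simp
  | cons p rest ih =>
    simp only [List.foldl_cons, ih, List.filter_cons]
    by_cases hp : p.2 = k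
    · simp [hp]
    · simp [hp, PySem.Dict.getD_insert, Ne.symm hp]

-- membership in the position list of k: exactly the in-range indices carrying k
theorem mem_positions (g : List String) (k : String) (i : Int) :
    i ∈ (((PySem.List.enumerate g).foldl
        (fun d p => d.insert p.2 (d.getD p.2 [] ++ [p.1])) PySem.Dict.empty).getD k [])
      ↔ ∃ m : Nat, m < g.length ∧ i = (m : Int) ∧ g[m]? = some k := by
  rw [getD_posfold]
  simp only [PySem.Dict.getD_empty, List.nil_append, List.mem_map, List.mem_filter]
  constructor
  · rintro ⟨p, ⟨hmem, hk⟩, hi⟩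
    rcases (PySem.List.mem_enumerate_iff _ _ _).1 hmem with ⟨m, hm, hp⟩
    subst hp
    refine ⟨m, hm, by simpa using hi.symm, ?_⟩
    simp only [beq_iff_eq] at hk
    simp [List.getElem?_eq_getElem hm, hk]
  · rintro ⟨m, hm, hi, hg⟩
    have hgm : g[m] = k := by
      have := List.getElem?_eq_getElem hm
      rw [hg] at this; injection this with h; exact h.symm
    refine ⟨((m : Int), k), ⟨?_, by simp⟩, by simp [hi]⟩
    exact (PySem.List.mem_enumerate_iff _ _ _).2 ⟨m, hm, by simp [hgm]⟩

-- painting a list of (nonnegative) indices: pointwise effect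
theorem paint_fold_getElem (I : List Int) (cs : List String) (color : String) (j : Nat)
    (hI : ∀ i ∈ I, 0 ≤ i) :
    (I.foldl (fun cs i => cs.set i.toNat color) cs)[j]?
      = if ((j : Int) ∈ I ∧ j < cs.length) then some color else cs[j]? := by
  induction I generalizing cs with
  | nil => simp
  | cons i I ih =>
    have hi0 : 0 ≤ i := hI i (by simp)
    simp only [List.foldl_cons]
    rw [ih _ (fun x hx => hI x (by simp [hx]))]
    by_cases hjI : (j : Int) ∈ I
    · by_cases hjl : j < cs.length <;>
        simp [hjI, hjl, List.length_set, List.mem_cons]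
    · by_cases hij : i = (j : Int)
      · have hnat : i.toNat = j := by omega
        by_cases hjl : j < cs.length <;>
          simp [hjI, hij, hjl, List.length_set, List.mem_cons]
      · have hnat : i.toNat ≠ j := by omega
        have hji : ¬ ((j : Int) = i) := fun h => hij h.symm
        simp [hjI, hnat, hji, List.length_set, List.mem_cons]

theorem paint_fold_length (I : List Int) (cs : List String) (color : String) :
    (I.foldl (fun cs i => cs.set i.toNat color) cs).length = cs.length := by
  induction I generalizing cs with
  | nil => rfl
  | cons i I ih => simp [List.foldl_cons, ih, List.length_set]

-- the whole painting loop, pointwise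
theorem paint_path_getElem (g path : List String) (cs : List String)
    (hlen : cs.length = g.length) (j : Nat) :
    (path.foldl (fun cs node =>
      ((((PySem.List.enumerate g).foldl
          (fun d p => d.insert p.2 (d.getD p.2 [] ++ [p.1])) PySem.Dict.empty).getD node []).foldl
        (fun cs i => cs.set i.toNat (if node = "start" ∨ node = "goal" then "red" else "blue")) cs)) cs)[j]?
      = match g[j]? with
        | some s => if s ∈ path then some (pvColorOf s) else cs[j]?
        | none => none := by
  induction path generalizing cs with
  | nil =>
    cases hg : g[j]? with
    | some s => simp
    | none =>
      have hj : g.length ≤ j := by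
        by_contra h
        simp [List.getElem?_eq_getElem (by omega : j < g.length)] at hg
      have hcs : cs[j]? = none := List.getElem?_eq_none_iff.2 (by omega)
      simp [hcs]
  | cons n rest ih =>
    simp only [List.foldl_cons]
    rw [ih _ (by rw [paint_fold_length]; exact hlen)]
    have hpos : ∀ i ∈ (((PySem.List.enumerate g).foldl
        (fun d p => d.insert p.2 (d.getD p.2 [] ++ [p.1])) PySem.Dict.empty).getD n []), 0 ≤ i := by
      intro i hi
      rcases (mem_positions g n i).1 hi with ⟨m, _, him, _⟩
      omega
    cases hg : g[j]? with
    | none => simp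
    | some s =>
      have hjlen : j < g.length := by
        by_contra h
        have hnone : g[j]? = none := List.getElem?_eq_none_iff.2 (by omega)
        simp [hnone] at hg
      rw [paint_fold_getElem _ _ _ _ hpos]
      have hmem : ((j : Int) ∈ (((PySem.List.enumerate g).foldl
          (fun d p => d.insert p.2 (d.getD p.2 [] ++ [p.1])) PySem.Dict.empty).getD n []))
          ↔ s = n := by
        rw [mem_positions]
        constructor
        · rintro ⟨m, hm, hjm, hgm⟩
          have hmj : m = j := by exact_mod_cast hjm.symm
          subst hmj
          rw [hg] at hgm; injection hgm
        · intro hsn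
          exact ⟨j, hjlen, rfl, by rw [hg, hsn]⟩
      by_cases hsr : s ∈ rest
      · simp [hsr]
      · by_cases hsn : s = n
        · simp [hsn, hmem.2 hsn, hlen ▸ hjlen, pvColorOf]
        · have hnm : ¬ ((j : Int) ∈ (((PySem.List.enumerate g).foldl
              (fun d p => d.insert p.2 (d.getD p.2 [] ++ [p.1])) PySem.Dict.empty).getD n [])) :=
            fun h => hsn (hmem.1 h)
          simp [hsr, hsn, hnm]

-- ===== VERDICT (by name: the statement is the Claim_ definition above) =====
theorem node_color_spec : Claim_equal_node_color := by
  intro g path _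
  unfold Spec_node_color node_color node_color_alt
  rw [node_color_foldl_map]
  simp only [List.nil_append]
  apply List.ext_getElem?
  intro j
  rw [paint_path_getElem g path _ (by simp) j]
  cases hg : g[j]? with
  | none => simp [List.getElem?_map, hg]
  | some s =>
    have hj : j < g.length := by
      by_contra h
      have hnone : g[j]? = none := List.getElem?_eq_none_iff.2 (by omega)
      simp [hnone] at hg
    have hgs : g[j] = s := by simpa [List.getElem?_eq_getElem hj] using hg
    by_cases hs : s ∈ path <;> simp [hs, hj, hgs]
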